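-- pv_equiv track=rewrite | github.com/mycatislovely/python_study | code/problems/python_drill/strange_square.py | strange_square
-- ===== SOURCE A (Python) =====
-- def strange_square(n):
--     m = [[0] * n for _ in range(n)]
--     for level in range(n // 2):
--         m [level][level] = 1 + level
--         m [level][n - level - 1] = 1 + level
--         m [n - level - 1][level] = n - level
--         m [n - level - 1][n - level - 1] = n - level
--     return m
-- ===== SOURCE B (Python) =====
-- def strange_square(n):
--     return [[i + 1 if (i == j) != (i + j == n - 1) else 0 for j in range(n)]
--             for i in range(n)]
-- ===== Notes on version B (the rewrite author's own statement) =====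
-- stated objective: idiomatic
-- what changed: Replaces A's zero-matrix allocation plus ring-by-ring in-place fill of four cells per level with a single double comprehension computing each cell directly from an XOR diagonal predicate.
import Mathlib
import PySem

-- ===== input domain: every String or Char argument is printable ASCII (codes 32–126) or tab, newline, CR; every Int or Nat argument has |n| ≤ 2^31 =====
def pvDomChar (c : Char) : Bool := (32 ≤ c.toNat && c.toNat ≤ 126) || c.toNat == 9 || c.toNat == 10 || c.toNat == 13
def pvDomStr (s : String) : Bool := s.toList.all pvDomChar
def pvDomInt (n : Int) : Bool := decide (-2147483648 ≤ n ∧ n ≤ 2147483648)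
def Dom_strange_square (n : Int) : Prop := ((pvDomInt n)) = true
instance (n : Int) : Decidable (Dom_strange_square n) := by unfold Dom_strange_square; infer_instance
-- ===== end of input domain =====

-- B builds each cell directly from an XOR diagonal predicate instead of A's zeroed grid
-- plus ring-by-ring in-place fill; same O(n^2) cost, more idiomatic (objective: idiomatic).

-- ===== PORT A =====
-- Python's `m[i][j] = v` at a valid non-negative index (exact here: A's loop only uses
-- indices 0 ≤ level, n-level-1 < n).
def pySetCell (m : List (List Int)) (i j : Int) (v : Int) : List (List Int) :=
  m.set i.toNat ((m.getD i.toNat []).set j.toNat v)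

def strange_square (n : Int) : List (List Int) :=
  let m := (PySem.List.pyRange 0 n 1).map (fun _ => List.replicate n.toNat (0 : Int))
  (PySem.List.pyRange 0 (PySem.Int.floordiv n 2) 1).foldl
    (fun m level =>
      let m := pySetCell m level level (1 + level)
      let m := pySetCell m level (n - level - 1) (1 + level)
      let m := pySetCell m (n - level - 1) level (n - level)
      pySetCell m (n - level - 1) (n - level - 1) (n - level)) m

-- ===== PORT B =====
def strange_square_alt (n : Int) : List (List Int) :=
  (PySem.List.pyRange 0 n 1).map (fun i =>
    (PySem.List.pyRange 0 n 1).map (fun j =>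
      if (i == j) != (i + j == n - 1) then i + 1 else 0))

-- ===== PRECONDITION & SPEC =====
def Spec_strange_square (n : Int) (out : List (List Int)) : Prop := out = strange_square_alt n
instance (n : Int) (out : List (List Int)) : Decidable (Spec_strange_square n out) := by unfold Spec_strange_square; infer_instance

-- ===== CLAIM (what is proved, stated in full; the proofs are below) =====
def Claim_equal_strange_square : Prop := ∀ (n : Int), Dom_strange_square n → Spec_strange_square n (strange_square n)

-- ===== LEMMAS AND PROOFS =====

-- proof-side closed form: an N×N matrix given by an entry function
def pvMat (N : Nat) (f : Nat → Nat → Int) : List (List Int) :=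
  (List.range N).map (fun i => (List.range N).map (f i))

-- entry function after processing levels 0..k-1 of A's loop
def pvG (N k i j : Nat) : Int :=
  if (i = j ∨ i + j + 1 = N) ∧ (i < k ∨ N ≤ i + k) then (i : Int) + 1 else 0

lemma pvMat_congr {N : Nat} {f f' : Nat → Nat → Int}
    (h : ∀ a b, a < N → b < N → f a b = f' a b) : pvMat N f = pvMat N f' := by
  unfold pvMat
  apply List.map_congr_left
  intro a ha
  apply List.map_congr_left
  intro b hb
  exact h a b (List.mem_range.mp ha) (List.mem_range.mp hb)

lemma pvMat_set (N : Nat) (f : Nat → Nat → Int) (i j : Nat) (hi : i < N) (hj : j < N) (v : Int) :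
    pySetCell (pvMat N f) (i : Int) (j : Int) v
      = pvMat N (fun a b => if a = i ∧ b = j then v else f a b) := by
  unfold pySetCell pvMat
  apply List.ext_getElem
  · simp
  · intro a h1 h2
    simp only [Int.toNat_natCast] at *
    rw [List.getElem_set]
    by_cases hai : i = a
    · subst hai
      rw [if_pos rfl]
      rw [List.getD_eq_getElem _ _ (by simpa using hi)]
      simp only [List.getElem_map, List.getElem_range]
      apply List.ext_getElem
      · simp
      · intro b hb1 hb2
        simp only [List.length_map, List.length_range] at hb2
        rw [List.getElem_set]
        simp only [List.getElem_map, List.getElem_range]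
        by_cases hbj : j = b
        · subst hbj
          rw [if_pos rfl, if_pos (by simp)]
        · rw [if_neg hbj, if_neg (fun h => hbj h.2.symm)]
    · rw [if_neg hai]
      simp only [List.getElem_map, List.getElem_range]
      apply List.map_congr_left
      intro b _
      rw [if_neg (fun h => hai h.1.symm)]

lemma pvStep (n : Int) (N : Nat) (hn : n = (N : Nat)) (k : Nat)
    (hk : k < N / 2) :
    (let m := pySetCell (pvMat N (pvG N k)) (k : Int) (k : Int) (1 + (k : Int))
     let m := pySetCell m (k : Int) (n - (k : Int) - 1) (1 + (k : Int))
     let m := pySetCell m (n - (k : Int) - 1) (k : Int) (n - (k : Int))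
     pySetCell m (n - (k : Int) - 1) (n - (k : Int) - 1) (n - (k : Int)))
      = pvMat N (pvG N (k + 1)) := by
  have hkN : k < N := by omega
  have hkN' : N - 1 - k < N := by omega
  have hcast : n - (k : Int) - 1 = ((N - 1 - k : Nat) : Int) := by
    subst hn; push_cast; omega
  have hval : n - (k : Int) = ((N - 1 - k : Nat) : Int) + 1 := by
    subst hn; push_cast; omega
  rw [hcast, hval]
  dsimp only
  rw [pvMat_set N _ k k hkN hkN, pvMat_set N _ k _ hkN hkN',
      pvMat_set N _ _ k hkN' hkN, pvMat_set N _ _ _ hkN' hkN']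
  apply pvMat_congr
  intro a b ha hb
  unfold pvG
  have hNk : ((N - 1 - k : Nat) : Int) = (N : Int) - 1 - k := by push_cast; omega
  split_ifs <;> (try rw [hNk]) <;> push_cast <;> omega

lemma pvLoop (n : Int) (N : Nat) (hn : n = (N : Nat)) (k : Nat) (hk : k ≤ N / 2) :
    (PySem.List.pyRange 0 (k : Int) 1).foldl
      (fun m level =>
        let m := pySetCell m level level (1 + level)
        let m := pySetCell m level (n - level - 1) (1 + level)
        let m := pySetCell m (n - level - 1) level (n - level)
        pySetCell m (n - level - 1) (n - level - 1) (n - level))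
      (pvMat N (fun _ _ => 0))
      = pvMat N (pvG N k) := by
  induction k with
  | zero =>
    rw [PySem.List.pyRange_one_eq_nil (by omega)]
    simp only [List.foldl_nil]
    apply pvMat_congr
    intro a b ha hb
    unfold pvG
    rw [if_neg (by omega)]
  | succ k ih =>
    have hk' : k ≤ N / 2 := by omega
    have : ((k : Int) + 1) = ((k + 1 : Nat) : Int) := by push_cast; ring
    rw [show ((k + 1 : Nat) : Int) = (k : Int) + 1 by push_cast; ring,
        PySem.List.pyRange_one_succ_right (by omega), List.foldl_append, ih hk']
    simp only [List.foldl_cons, List.foldl_nil]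
    exact pvStep n N hn k (by omega)

lemma pvBase (n : Int) (N : Nat) (hn : n = (N : Nat)) :
    (PySem.List.pyRange 0 n 1).map (fun _ => List.replicate n.toNat (0 : Int))
      = pvMat N (fun _ _ => 0) := by
  subst hn
  rw [PySem.List.pyRange_one]
  unfold pvMat
  simp only [List.map_map]
  apply List.map_congr_left
  intro a _
  simp [List.map_const']

lemma pvAlt (n : Int) (N : Nat) (hn : n = (N : Nat)) :
    strange_square_alt n = pvMat N (pvG N (N / 2)) := by
  unfold strange_square_alt
  rw [PySem.List.pyRange_one]
  simp only [hn, zero_add, sub_zero, Int.toNat_natCast, List.map_map]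
  apply pvMat_congr
  intro a b ha hb
  simp only [Function.comp]
  unfold pvG
  by_cases h1 : (a : Int) = (b : Int) <;> by_cases h2 : (a : Int) + (b : Int) = (N : Int) - 1
  · rw [if_neg (by simp [h1]; omega), if_neg (by omega)]
  · rw [if_pos (by simp [h1]; omega), if_pos (by omega)]
  · rw [if_pos (by simp [h1, h2]), if_pos (by omega)]
  · rw [if_neg (by simp [h1, h2]), if_neg (by omega)]

-- ===== VERDICT (by name: the statement is the Claim_ definition above) =====
theorem strange_square_spec : Claim_equal_strange_square := by
  intro n _
  unfold Spec_strange_square strange_square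
  by_cases hn : 0 ≤ n
  · obtain ⟨N, hN⟩ : ∃ N : Nat, n = (N : Int) := ⟨n.toNat, by omega⟩
    have hfd : PySem.Int.floordiv n 2 = ((N / 2 : Nat) : Int) := by
      rw [PySem.Int.floordiv_eq_ediv_of_pos (by omega), hN]
      omega
    simp only [hfd, pvBase n N hN]
    rw [pvLoop n N hN (N / 2) le_rfl, pvAlt n N hN]
  · have h1 : PySem.List.pyRange 0 n 1 = [] := PySem.List.pyRange_one_eq_nil (by omega)
    have h2 : PySem.List.pyRange 0 (PySem.Int.floordiv n 2) 1 = [] := by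
      apply PySem.List.pyRange_one_eq_nil
      rw [PySem.Int.floordiv_eq_ediv_of_pos (by omega)]
      omega
    simp only [strange_square_alt, h1, h2, List.map_nil, List.foldl_nil]
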